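-- pv_equiv track=rewrite | github.com/UCSOAR/H743VIT6TemplateRepository | parser.py | split_imu_rows
-- ===== SOURCE A (Python) =====
-- def split_imu_rows(rows, imu_type):
--     subset = [r for r in rows if r[0] == imu_type]
--     return {
--         "timestamp": [r[3] for r in subset],
--         "ax": [r[4] for r in subset],
--         "ay": [r[5] for r in subset],
--         "az": [r[6] for r in subset],
--         "gx": [r[7] for r in subset],
--         "gy": [r[8] for r in subset],
--         "gz": [r[9] for r in subset],
--         "temp": [r[10] for r in subset],
--     }
-- ===== SOURCE B (Python) =====
-- _KEYS = ("timestamp", "ax", "ay", "az", "gx", "gy", "gz", "temp")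
--
-- def split_imu_rows(rows, imu_type):
--     matrix = [r[3:11] for r in rows if r[0] == imu_type]
--     cols = [list(c) for c in zip(*matrix)] if matrix else [[] for _ in _KEYS]
--     return dict(zip(_KEYS, cols))
-- ===== Notes on version B (the rewrite author's own statement) =====
-- stated objective: alternative
-- what changed: B slices each matching row to its eight-field segment r[3:11], transposes the resulting matrix with zip(*matrix), and zips the key tuple with the columns, instead of re-scanning the filtered subset with eight per-key comprehensions.
import Mathlib
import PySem

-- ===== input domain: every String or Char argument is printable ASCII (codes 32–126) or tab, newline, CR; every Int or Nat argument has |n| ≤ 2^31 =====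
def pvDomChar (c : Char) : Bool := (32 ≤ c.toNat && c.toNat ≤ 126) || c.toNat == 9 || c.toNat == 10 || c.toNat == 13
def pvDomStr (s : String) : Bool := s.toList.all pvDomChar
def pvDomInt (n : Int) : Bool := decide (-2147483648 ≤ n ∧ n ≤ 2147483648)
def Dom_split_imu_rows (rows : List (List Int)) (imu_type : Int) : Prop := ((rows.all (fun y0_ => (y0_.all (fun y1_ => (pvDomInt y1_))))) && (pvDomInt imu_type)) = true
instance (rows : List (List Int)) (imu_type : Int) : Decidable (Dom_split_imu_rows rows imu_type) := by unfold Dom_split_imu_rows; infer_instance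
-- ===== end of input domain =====

-- B slices each matching row to r[3:11], transposes the matrix (zip(*matrix)) and zips the key
-- tuple with the columns, instead of re-scanning the filtered subset with eight comprehensions.

-- r[i] for a row; Pre_ guarantees the index is in range, so the .getD 0 default is never read.
def pvCell (r : List Int) (i : Int) : Int := (PySem.List.pyGet? r i).getD 0

-- ===== PORT A =====
def split_imu_rows (rows : List (List Int)) (imu_type : Int) : List (String × List Int) :=
  let subset := rows.filter (fun r => pvCell r 0 == imu_type)
  [("timestamp", subset.map (fun r => pvCell r 3)),
   ("ax", subset.map (fun r => pvCell r 4)),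
   ("ay", subset.map (fun r => pvCell r 5)),
   ("az", subset.map (fun r => pvCell r 6)),
   ("gx", subset.map (fun r => pvCell r 7)),
   ("gy", subset.map (fun r => pvCell r 8)),
   ("gz", subset.map (fun r => pvCell r 9)),
   ("temp", subset.map (fun r => pvCell r 10))]

-- ===== PORT B =====
-- zip(*matrix): emit the heads of all rows, recurse on the tails, stopping at the shortest row;
-- the fuel is the first row's length, which is exactly the number of steps before its tail empties.
def pvZipStarAux : Nat → List (List Int) → List (List Int)
  | 0, _ => []
  | Nat.succ n, m =>
    if m.all (fun r => !r.isEmpty) then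
      (m.map (fun r => r.headI)) :: pvZipStarAux n (m.map (fun r => r.tail))
    else []

def pvZipStar (m : List (List Int)) : List (List Int) := pvZipStarAux m.headI.length m

def pvKeys : List String := ["timestamp", "ax", "ay", "az", "gx", "gy", "gz", "temp"]

-- dict(zip(_KEYS, cols)) with the eight distinct keys is the association list List.zip pvKeys cols.
def split_imu_rows_alt (rows : List (List Int)) (imu_type : Int) : List (String × List Int) :=
  let matrix := (rows.filter (fun r => pvCell r 0 == imu_type)).map
                  (fun r => PySem.List.slice r (some 3) (some 11))
  let cols := if matrix.isEmpty then List.replicate 8 ([] : List Int) else pvZipStar matrix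
  List.zip pvKeys cols

-- ===== PRECONDITION & SPEC =====
-- Pre_ excludes exactly the inputs where Python A raises IndexError: an empty row (r[0]),
-- or a matching row shorter than 11 (r[3]..r[10]).
def Pre_split_imu_rows (rows : List (List Int)) (imu_type : Int) : Prop :=
  ∀ r ∈ rows, r ≠ [] ∧ (pvCell r 0 = imu_type → 11 ≤ r.length)
instance (rows : List (List Int)) (imu_type : Int) : Decidable (Pre_split_imu_rows rows imu_type) := by
  unfold Pre_split_imu_rows; infer_instance
def pvWitness_split_imu_rows : List (List Int) × Int :=
  ([[1, 0, 0, 10, 1, 2, 3, 4, 5, 6, 7], [2, 5]], 1)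

def Spec_split_imu_rows (rows : List (List Int)) (imu_type : Int) (out : List (String × List Int)) : Prop := out = split_imu_rows_alt rows imu_type
instance (rows : List (List Int)) (imu_type : Int) (out : List (String × List Int)) : Decidable (Spec_split_imu_rows rows imu_type out) := by unfold Spec_split_imu_rows; infer_instance

-- ===== CLAIM (what is proved, stated in full; the proofs are below) =====
def Claim_equal_split_imu_rows : Prop := ∀ (rows : List (List Int)) (imu_type : Int), Dom_split_imu_rows rows imu_type → Pre_split_imu_rows rows imu_type → Spec_split_imu_rows rows imu_type (split_imu_rows rows imu_type)

-- ===== LEMMAS AND PROOFS =====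

-- A row of length ≥ 11 sliced to [3:11] is exactly its eight IMU fields.
theorem slice_eq_cells (r : List Int) (hr : 11 ≤ r.length) :
    PySem.List.slice r (some 3) (some 11) =
      [pvCell r 3, pvCell r 4, pvCell r 5, pvCell r 6,
       pvCell r 7, pvCell r 8, pvCell r 9, pvCell r 10] := by
  match r, hr with
  | a0 :: a1 :: a2 :: a3 :: a4 :: a5 :: a6 :: a7 :: a8 :: a9 :: a10 :: rest, _ =>
    simp [pysem, pvCell]

-- zip(*m) of a rectangular matrix whose rows all have length n: column i is the i-th entry of every row.
theorem pvZipStarAux_transpose (n : Nat) : ∀ (m : List (List Int)), (∀ r ∈ m, r.length = n) →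
    pvZipStarAux n m = (List.range n).map (fun i => m.map (fun r => r.getD i 0)) := by
  induction n with
  | zero => intro m _; simp [pvZipStarAux]
  | succ n ih =>
    intro m h
    have hall : m.all (fun r => !r.isEmpty) = true := by
      simp only [List.all_eq_true]
      intro r hr
      have := h r hr
      cases r with
      | nil => simp at this
      | cons a rs => simp
    have htails : ∀ t ∈ m.map (fun r => r.tail), t.length = n := by
      intro t ht
      rcases List.mem_map.mp ht with ⟨r, hr, rfl⟩
      have := h r hr
      cases r with
      | nil => simp at this
      | cons a rs => simpa using this
    rw [pvZipStarAux, if_pos hall, ih _ htails, List.range_succ_eq_map]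
    simp only [List.map_cons, List.map_map, Function.comp_def]
    congr 1
    · apply List.map_congr_left
      intro r hr
      have := h r hr
      cases r with
      | nil => simp at this
      | cons a rs => simp
    · apply List.map_congr_left
      intro i _
      apply List.map_congr_left
      intro r hr
      have := h r hr
      cases r with
      | nil => simp at this
      | cons a rs => simp

-- ===== VERDICT (by name: the statement is the Claim_ definition above) =====
theorem split_imu_rows_spec : Claim_equal_split_imu_rows := by
  intro rows imu_type _ hpre
  unfold Spec_split_imu_rows
  simp only [split_imu_rows, split_imu_rows_alt]
  have hlen : ∀ r ∈ rows.filter (fun r => pvCell r 0 == imu_type), 11 ≤ r.length := by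
    intro r hr
    rcases List.mem_filter.mp hr with ⟨hmem, hp⟩
    exact (hpre r hmem).2 (by simpa using hp)
  rw [List.map_congr_left (fun r hr => slice_eq_cells r (hlen r hr))]
  cases hs : rows.filter (fun r => pvCell r 0 == imu_type) with
  | nil => simp [pvKeys]
  | cons s rest =>
    have hrect : ∀ t ∈ ((s :: rest).map (fun r =>
        [pvCell r 3, pvCell r 4, pvCell r 5, pvCell r 6,
         pvCell r 7, pvCell r 8, pvCell r 9, pvCell r 10])), t.length = 8 := by
      intro t ht
      rcases List.mem_map.mp ht with ⟨r, _, rfl⟩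
      rfl
    rw [if_neg (by simp)]
    rw [pvZipStar]
    have hfuel : (((s :: rest).map (fun r =>
        [pvCell r 3, pvCell r 4, pvCell r 5, pvCell r 6,
         pvCell r 7, pvCell r 8, pvCell r 9, pvCell r 10])).headI.length) = 8 := rfl
    rw [hfuel, pvZipStarAux_transpose 8 _ hrect]
    simp [List.range_succ, pvKeys, List.zip, List.getD]
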